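-- pv_equiv track=rewrite | github.com/juliecsl/PRESENT24 | attaque_par_le_milieu.py | main_chiffrement
-- ===== SOURCE A (Python) =====
-- dico_substitution = {"0":"c", "1":"5", "2":"6", "3":"b", "4":"9", "5":"0", "6":"a",
--                         "7":"d", "8":"3", "9":"e", "a":"f", "b":"8", "c":"4", "d":"7",
--                         "e":"1", "f":"2"}
--
-- liste_permutation = [0, 4, 8, 12, 16, 20, 1, 5, 9, 13, 17, 21, 2, 6,
--                          10, 14, 18, 22, 3, 7, 11, 15, 19, 23]
--
-- def main_chiffrement(m, CLE_MAITRE):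
--     """
--     Algorithme 1 de l'énonce du DM
--     Entrée: m le message à chiffrer en hexidécimal sous forme de str de taille 6
--             CLE_MAITRE le clé maitre en héxidécimal sous forme de str de taille 6
--     Sortie: le message chiffré en hexidécimal.
--     """
--     K = str(CLE_MAITRE) + str("0"*14)  # registre de 20 bits en hexa
--     K = bin(int(K, 16))[2:].zfill(80)  # Convertie de l'hexa vers le binaire  # Si le resultat de la conversion en hex fait moins de 80 bits on rajoute des 0 à gauche.
--
--     j = 0
--     etat = bin(int(m, 16))[2:]  # Hexa to binaire
--     for i in range(1, 10+1):
--         j += 1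
--         ki = K[79-39:79-16+1]  # en binaire  # determine ki
--
--         # ################
--         # MAJ DU REGISTRE K
--         k = K[61:] + K[:61] # Fait pivoter le registre K de 61 positions vers la gauche.
--
--         # SUBSTITUTION
--         k_prime = ''.join([dico_substitution[elem] for elem in hex(int(k[0:4] ,2))[2:]])
--
--         k_prime = bin(int(k_prime, 16))[2:].zfill(4)  # hexa en binaire + Si le resultat fait moins de 4 bits alors on rajoute des 0 à gauche
--
--         k = k_prime[0:4] + k[4:]# Met le registre K à jour avec les bits permutés
--
--         # XOR
--         k_prime = bin(int("".join(k[79-19:79-15+1]),2) ^ i)[2:].zfill(5) # un str binaire # k_prime XOR i  # Si le resultat du XOR fait moins de 5 bits on rajoute des 0 à gauche.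
--         ####
--
--         K = k[:79-19] + k_prime + k[79-15+1:] # Met les bits [k19k18...k15 à jour]
--
--         # #####################################
--
--         etat = hex(int(etat, 2) ^ int(ki, 2))[2:].zfill(6)  # renvoie l'etat en hexa du resultat du XOR entre l'état et ki
--         # Si le resultat du XOR fait moins de 24 bits on rajoute des 0 à gauche.
--
--         # SUBSTITUTION
--         etat = ''.join([dico_substitution[elem] for elem in etat])
--         # #####################
--
--         etat = bin(int(etat, 16))[2:].zfill(24)  # Hexa to binaire
--         # Si le resultat du XOR fait moins de 24 bits on rajoute des 0 à gauche.
--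
--         # PERMUTATION
--         etat = ''.join([etat[i] for i in liste_permutation])
--
--     ki = K[79-39:79-16+1]   # k11  # determine ki
--     etat = hex(int(etat, 2) ^ int(ki, 2))[2:]  # etat XOR ki
--     return etat
-- ===== SOURCE B (Python) =====
-- # T-table re-implementation: the round keys are derived up front in a separate
-- # key-schedule pass, and each round is 6 lookups into precomputed 24-bit tables
-- # that fuse the S-box and the bit permutation (no per-bit permutation work).
-- SBOX = [0xC, 0x5, 0x6, 0xB, 0x9, 0x0, 0xA, 0xD,
--         0x3, 0xE, 0xF, 0x8, 0x4, 0x7, 0x1, 0x2]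
--
-- # PBIT[b] = position of the source bit that lands on bit b after the permutation
-- PBIT = [23 - (4 * ((23 - b) % 6) + (23 - b) // 6) for b in range(24)]
--
--
-- def _perm(x):
--     return sum(((x >> PBIT[b]) & 1) << b for b in range(24))
--
--
-- # T[p][d] = permutation applied to (S-box of nibble d placed at nibble position p);
-- # the permutation maps distinct nibbles to disjoint bit sets, so a round's output
-- # is simply the sum of the six table entries.
-- T = [[_perm(SBOX[d] << 4 * p) for d in range(16)] for p in range(6)]
--
--
-- def _next_key(K, i):
--     K = ((K & ((1 << 19) - 1)) << 61) + (K >> 19)        # rotate left by 61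
--     K = (SBOX[K >> 76] << 76) + K % (1 << 76)             # S-box the top nibble
--     return K ^ (i << 15)                                  # round counter
--
--
-- def main_chiffrement(m, CLE_MAITRE):
--     # stage 1: the whole key schedule (11 round keys)
--     K = int(str(CLE_MAITRE) + "0" * 14, 16)
--     round_keys = []
--     for i in range(1, 11):
--         round_keys.append((K >> 16) & 0xFFFFFF)
--         K = _next_key(K, i)
--     round_keys.append((K >> 16) & 0xFFFFFF)
--     # stage 2: the 10 rounds, SubCells+pLayer fused into the T tables
--     state = int(m, 16)
--     for rk in round_keys[:10]:
--         x = state ^ rk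
--         s = 0
--         for p in range(6):
--             s += T[p][(x >> 4 * p) & 0xF]
--         state = s
--     return format(state ^ round_keys[10], 'x')
-- ===== Notes on version B (the rewrite author's own statement) =====
-- stated objective: alternative
-- what changed: B replaces A's per-round binary-string rebuilding (bin/hex/zfill/join) by a staged integer implementation: the whole 11-key schedule is derived first in its own pass, and each round is six lookups into precomputed 24-bit T-tables that fuse the S-box with the bit permutation, so no per-bit permutation or string work happens per round.
-- outside the precondition, e.g. on main_chiffrement('1000000', '000000'): A returns 'ec11a0', B returns 'bb57e6'; on main_chiffrement('0', '10000000'): A returns '42571e', B returns '8622f0'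
import Mathlib
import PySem

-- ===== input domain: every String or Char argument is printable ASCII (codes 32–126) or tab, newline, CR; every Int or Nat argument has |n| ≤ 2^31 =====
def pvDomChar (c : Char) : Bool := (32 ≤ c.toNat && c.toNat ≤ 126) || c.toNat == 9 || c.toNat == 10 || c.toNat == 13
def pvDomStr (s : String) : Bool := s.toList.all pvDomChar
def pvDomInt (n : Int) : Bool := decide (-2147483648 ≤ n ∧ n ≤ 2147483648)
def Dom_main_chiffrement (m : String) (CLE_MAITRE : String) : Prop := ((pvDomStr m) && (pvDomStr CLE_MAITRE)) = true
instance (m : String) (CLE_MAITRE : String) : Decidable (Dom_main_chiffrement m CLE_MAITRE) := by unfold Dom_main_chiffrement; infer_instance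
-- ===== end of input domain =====

-- B derives the whole key schedule first, then runs the 10 rounds as lookups into
-- precomputed T-tables fusing the S-box with the bit permutation (no per-round
-- string rebuilding and no per-bit permutation work); same return value.

-- ===== PORT A =====

-- dico_substitution: the module-level S-box dict (1-char keys/values ↦ Char)
def dico_substitution : PySem.Dict Char Char :=
  PySem.Dict.ofList
  [('0','c'), ('1','5'), ('2','6'), ('3','b'), ('4','9'), ('5','0'), ('6','a'),
   ('7','d'), ('8','3'), ('9','e'), ('a','f'), ('b','8'), ('c','4'), ('d','7'),
   ('e','1'), ('f','2')]

def liste_permutation : List Int :=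
  [0, 4, 8, 12, 16, 20, 1, 5, 9, 13, 17, 21, 2, 6,
   10, 14, 18, 22, 3, 7, 11, 15, 19, 23]

-- dico_substitution[elem]; KeyError (here: junk '*') never reached on inputs in Pre_
def subChar (c : Char) : Char := (PySem.Dict.get? dico_substitution c).getD '*'

-- int(s, b) hand-ported for the INTERNAL digit strings A builds itself (outputs of
-- bin()/hex(), i.e. nonempty strings of 0-9/a-f): exact there (no sign/prefix occurs).
def pvCharVal (c : Char) : Nat :=
  if '0' ≤ c ∧ c ≤ '9' then c.toNat - 48
  else if 'a' ≤ c ∧ c ≤ 'f' then c.toNat - 87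
  else if 'A' ≤ c ∧ c ≤ 'F' then c.toNat - 55
  else 0
def pvParse (b : Nat) (cs : List Char) : Nat := cs.foldl (fun a c => a * b + pvCharVal c) 0

-- bin(x)[2:] via the PySem primitive (x here is a parsed value, ≥ 0 on Pre_)
def pvBin (x : Nat) : List Char := PySem.List.slice (PySem.Int.toBinChars0b (x : Int)) (some 2) none
-- hex(x)[2:] for x ≥ 0: hand port (PySem has no hex); Nat.toDigits 16 is exactly
-- Python's lowercase hex digits of a nonnegative int, no prefix, '0' for 0.
def pvHex (x : Nat) : List Char := Nat.toDigits 16 x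

-- the body of A's `for i in range(1, 10+1)` loop; state = (j, K, etat)
def chiffRound (st : Nat × List Char × List Char) (i : Int) : Nat × List Char × List Char :=
  match st with
  | (j, K, etat) =>
    let j := j + 1
    let ki := PySem.List.slice K (some 40) (some 64)                  -- K[79-39 : 79-16+1]
    let k := PySem.List.slice K (some 61) none ++ PySem.List.slice K none (some 61)
    let k_prime := (pvHex (pvParse 2 (PySem.List.slice k (some 0) (some 4)))).map subChar
    let k_prime := PySem.Chars.zfill (pvBin (pvParse 16 k_prime)) 4
    let k := PySem.List.slice k_prime (some 0) (some 4) ++ PySem.List.slice k (some 4) none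
    -- i ∈ [1, 10], so i.toNat is exact
    let k_prime := PySem.Chars.zfill (pvBin (pvParse 2 (PySem.List.slice k (some 60) (some 65)) ^^^ i.toNat)) 5
    let K := PySem.List.slice k none (some 60) ++ k_prime ++ PySem.List.slice k (some 65) none
    let etat := PySem.Chars.zfill (pvHex (pvParse 2 etat ^^^ pvParse 2 ki)) 6
    let etat := etat.map subChar
    let etat := PySem.Chars.zfill (pvBin (pvParse 16 etat)) 24
    let etat := liste_permutation.map (fun p => PySem.List.pyGetD etat p '0')  -- etat[p], p always in range
    (j, K, etat)

def main_chiffrement (m : String) (CLE_MAITRE : String) : String :=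
  let K0 : List Char := CLE_MAITRE.toList ++ List.replicate 14 '0'    -- str(CLE_MAITRE) + "0"*14
  -- int(K, 16): ValueError (none) and negative values are outside Pre_ (there bin's
  -- output would make a later int(_, 2) raise); .getD 0/.toNat are unreachable junk.
  let K : List Char := PySem.Chars.zfill (pvBin ((PySem.Int.ofCharsBase? K0 16).getD 0).toNat) 80
  let etat : List Char := pvBin ((PySem.Int.ofCharsBase? m.toList 16).getD 0).toNat
  let st := (PySem.List.pyRange 1 11 1).foldl chiffRound (0, K, etat)
  let ki := PySem.List.slice st.2.1 (some 40) (some 64)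
  String.ofList (pvHex (pvParse 2 st.2.2 ^^^ pvParse 2 ki))

-- ===== PORT B =====

def SBOX : List Nat := [0xC, 0x5, 0x6, 0xB, 0x9, 0x0, 0xA, 0xD,
                        0x3, 0xE, 0xF, 0x8, 0x4, 0x7, 0x1, 0x2]

-- PBIT[b] = position of the source bit that lands on bit b after the permutation
def PBIT : List Nat := (List.range 24).map (fun b => 23 - (4 * ((23 - b) % 6) + (23 - b) / 6))

-- _perm(x)
def permInt (x : Nat) : Nat := ((List.range 24).map (fun b => ((x >>> PBIT.getD b 0) &&& 1) <<< b)).sum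

-- T[p][d] = permutation applied to (S-box of nibble d placed at nibble position p)
def Ttab : List (List Nat) :=
  (List.range 6).map (fun p => (List.range 16).map (fun d => permInt (SBOX.getD d 0 <<< (4 * p))))

-- format(x, 'x') for x ≥ 0: lowercase hex digits, no prefix (same rendering as pvHex)
def fmtHex (x : Nat) : List Char := Nat.toDigits 16 x

-- _next_key(K, i); i ∈ [1,10] so i.toNat is exact
def nextKey (K : Nat) (i : Int) : Nat :=
  let K := ((K &&& ((1 <<< 19) - 1)) <<< 61) + (K >>> 19)
  let K := (SBOX.getD (K >>> 76) 0) <<< 76 + K % (1 <<< 76)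
  K ^^^ (i.toNat <<< 15)

-- one pass of stage 1's loop: append the current round key, update the register
def keyStep (st : List Nat × Nat) (i : Int) : List Nat × Nat :=
  (st.1 ++ [(st.2 >>> 16) &&& 0xFFFFFF], nextKey st.2 i)

-- one round of stage 2: 6 T-table lookups summed; indices are always < 16
def encRound (state : Nat) (rk : Nat) : Nat :=
  let x := state ^^^ rk
  (List.range 6).foldl (fun s p => s + (Ttab.getD p []).getD ((x >>> (4 * p)) &&& 0xF) 0) 0

def main_chiffrement_alt (m : String) (CLE_MAITRE : String) : String :=
  let K := ((PySem.Int.ofCharsBase? (CLE_MAITRE.toList ++ List.replicate 14 '0') 16).getD 0).toNat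
  let st := (PySem.List.pyRange 1 11 1).foldl keyStep ([], K)
  let round_keys := st.1 ++ [(st.2 >>> 16) &&& 0xFFFFFF]
  let state := ((PySem.Int.ofCharsBase? m.toList 16).getD 0).toNat
  let state := (PySem.List.slice round_keys none (some 10)).foldl encRound state
  String.ofList (fmtHex (state ^^^ round_keys.getD 10 0))  -- round_keys[10], always in range

-- ===== PRECONDITION & SPEC =====

-- Pre_ excludes (a) inputs on which int() raises or yields a negative value — there A
-- raises (ValueError, possibly on a later int(_, 2)); (b) a message ≥ 2^24 or a padded
-- key ≥ 2^80 — there A still returns, but its fixed-width string indexing silently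
-- truncates/misaligns the oversized value, an artefact of the 24/80-char registers,
-- while B treats the registers as 24-/80-bit integers.
def Pre_main_chiffrement (m : String) (CLE_MAITRE : String) : Prop :=
  (((PySem.Int.ofCharsBase? m.toList 16).any fun v => decide (0 ≤ v ∧ v < 2 ^ 24)) &&
   ((PySem.Int.ofCharsBase? (CLE_MAITRE.toList ++ List.replicate 14 '0') 16).any fun v =>
      decide (0 ≤ v ∧ v < 2 ^ 80))) = true
instance (m : String) (CLE_MAITRE : String) : Decidable (Pre_main_chiffrement m CLE_MAITRE) := by
  unfold Pre_main_chiffrement; infer_instance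

def pvWitness_main_chiffrement : String × String := ("d1c48a", "bd1648")

def Spec_main_chiffrement (m : String) (CLE_MAITRE : String) (out : String) : Prop :=
  out = main_chiffrement_alt m CLE_MAITRE
instance (m : String) (CLE_MAITRE : String) (out : String) : Decidable (Spec_main_chiffrement m CLE_MAITRE out) := by
  unfold Spec_main_chiffrement; infer_instance

-- ===== CLAIM (what is proved, stated in full; the proofs are below) =====
def Claim_equal_main_chiffrement : Prop := ∀ (m : String) (CLE_MAITRE : String), Dom_main_chiffrement m CLE_MAITRE → Pre_main_chiffrement m CLE_MAITRE → Spec_main_chiffrement m CLE_MAITRE (main_chiffrement m CLE_MAITRE)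

-- ===== LEMMAS AND PROOFS =====

-- big-endian base-b digit string of the low n digits of x (the shape of every
-- register string A manipulates)
def digitsBE (b : Nat) : Nat → Nat → List Char
  | 0, _ => []
  | n + 1, x => digitsBE b n (x / b) ++ [Nat.digitChar (x % b)]

theorem length_digitsBE (b n x : Nat) : (digitsBE b n x).length = n := by
  induction n generalizing x with
  | zero => rfl
  | succ n ih => simp [digitsBE, ih]

theorem digitsBE_zero (b n : Nat) : digitsBE b n 0 = List.replicate n '0' := by
  induction n with
  | zero => rfl
  | succ n ih => simp [digitsBE, ih, List.replicate_succ']; rfl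

theorem digitsBE_split (b hi lo x : Nat) :
    digitsBE b (hi + lo) x = digitsBE b hi (x / b ^ lo) ++ digitsBE b lo x := by
  induction lo generalizing x with
  | zero => simp [digitsBE]
  | succ lo ih =>
      show digitsBE b ((hi + lo) + 1) x = _
      rw [digitsBE, ih (x / b), digitsBE]
      simp [Nat.div_div_eq_div_mul, Nat.pow_succ, Nat.mul_comm]

theorem digitsBE_add_mul (b n a r : Nat) (hb : 0 < b) :
    digitsBE b n (a * b ^ n + r) = digitsBE b n r := by
  induction n generalizing r with
  | zero => simp [digitsBE]
  | succ n ih =>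
      rw [digitsBE, digitsBE]
      have h1 : (a * b ^ (n + 1) + r) / b = a * b ^ n + r / b := by
        rw [show a * b ^ (n + 1) + r = b * (a * b ^ n) + r by ring, Nat.mul_add_div hb]
      have h2 : (a * b ^ (n + 1) + r) % b = r % b := by
        rw [show a * b ^ (n + 1) + r = b * (a * b ^ n) + r by ring, Nat.mul_add_mod]
      rw [h1, h2, ih]

theorem digitsBE_drop (b n p x : Nat) (h : p ≤ n) :
    (digitsBE b n x).drop p = digitsBE b (n - p) x := by
  conv_lhs => rw [show n = p + (n - p) by omega, digitsBE_split]
  rw [List.drop_left' (length_digitsBE b p _)]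

theorem digitsBE_take (b n q x : Nat) (h : q ≤ n) :
    (digitsBE b n x).take q = digitsBE b q (x / b ^ (n - q)) := by
  conv_lhs => rw [show n = q + (n - q) by omega, digitsBE_split]
  rw [List.take_left' (length_digitsBE b q _)]

theorem digitsBE_append_eq (b hi lo xh r : Nat) (hb : 0 < b) (hr : r < b ^ lo) :
    digitsBE b hi xh ++ digitsBE b lo r = digitsBE b (hi + lo) (xh * b ^ lo + r) := by
  rw [digitsBE_split]
  have h1 : (xh * b ^ lo + r) / b ^ lo = xh := by
    rw [Nat.mul_comm, Nat.mul_add_div (Nat.pow_pos hb), Nat.div_eq_of_lt hr]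
    omega
  have h2 : digitsBE b lo (xh * b ^ lo + r) = digitsBE b lo r := digitsBE_add_mul b lo xh r hb
  rw [h1, h2]

theorem pvParse_append (b : Nat) (l : List Char) (c : Char) :
    pvParse b (l ++ [c]) = pvParse b l * b + pvCharVal c := by
  simp [pvParse, List.foldl_append]

theorem pvCharVal_digitChar : ∀ d, d < 16 → pvCharVal (Nat.digitChar d) = d := by decide

theorem parse_digitsBE (b n x : Nat) (hb0 : 0 < b) (hb : b ≤ 16) :
    pvParse b (digitsBE b n x) = x % b ^ n := by
  induction n generalizing x with
  | zero => simp [digitsBE, pvParse, Nat.mod_one]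
  | succ n ih =>
      rw [digitsBE, pvParse_append, ih, pvCharVal_digitChar _ (lt_of_lt_of_le (Nat.mod_lt _ hb0) hb)]
      rw [Nat.pow_succ, Nat.mul_comm (b ^ n) b, Nat.mod_mul]
      ring

theorem toDigitsCore_eq (b : Nat) (hb : 2 ≤ b) :
    ∀ (fuel n : Nat) (acc : List Char), n < fuel →
      Nat.toDigitsCore b fuel n acc = digitsBE b (Nat.log b n + 1) n ++ acc := by
  intro fuel
  induction fuel with
  | zero => intro n acc h; omega
  | succ f ih =>
      intro n acc h
      simp only [Nat.toDigitsCore]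
      by_cases hd : n / b = 0
      · have hn : n < b := by
          rcases Nat.div_eq_zero_iff.mp hd with h | h
          · omega
          · exact h
        rw [hd]
        simp only [if_pos]
        rw [Nat.log_of_lt hn]
        simp [digitsBE, Nat.mod_eq_of_lt hn]
      · have hbn : b ≤ n := by
          by_contra hcon
          exact hd (Nat.div_eq_of_lt (by omega))
        have hnpos : 0 < n := by omega
        have hfuel : n / b < f := by
          have h1 : n / b < n := Nat.div_lt_self hnpos (by omega)
          omega
        rw [if_neg hd, ih (n / b) _ hfuel]
        have hlog : Nat.log b n = Nat.log b (n / b) + 1 := by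
          have h1 := Nat.log_div_base b n
          have h2 := Nat.log_pos (by omega : 1 < b) hbn
          omega
        rw [hlog]
        conv_rhs => rw [digitsBE]
        simp

theorem toDigits_eq (b n : Nat) (hb : 2 ≤ b) :
    Nat.toDigits b n = digitsBE b (Nat.log b n + 1) n := by
  unfold Nat.toDigits
  rw [toDigitsCore_eq b hb _ _ _ (Nat.lt_succ_self n), List.append_nil]

theorem digitChar_ne_sign : ∀ d, d < 16 → Nat.digitChar d ≠ '+' ∧ Nat.digitChar d ≠ '-' := by decide

theorem mem_digitsBE_ne_sign (b n x : Nat) (hb0 : 0 < b) (hb : b ≤ 16) :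
    ∀ c ∈ digitsBE b n x, c ≠ '+' ∧ c ≠ '-' := by
  induction n generalizing x with
  | zero => simp [digitsBE]
  | succ n ih =>
      intro c hc
      rw [digitsBE] at hc
      rcases List.mem_append.mp hc with h | h
      · exact ih _ c h
      · simp at h
        subst h
        exact digitChar_ne_sign _ (lt_of_lt_of_le (Nat.mod_lt _ hb0) hb)

theorem zfill_no_sign (cs : List Char) (w : Int) (h : ∀ c ∈ cs, c ≠ '+' ∧ c ≠ '-') :
    PySem.Chars.zfill cs w = List.replicate (w.toNat - cs.length) '0' ++ cs := by
  cases cs with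
  | nil =>
      unfold PySem.Chars.zfill
      split_ifs with h1
      · have : w.toNat = 0 := by simp at h1; omega
        simp [this]
      · simp
  | cons c rest =>
      have hc := h c (by simp)
      unfold PySem.Chars.zfill
      split_ifs with h1
      · have h0 : w.toNat - (rest.length + 1) = 0 := by simp at h1; omega
        simp [h0]
      · dsimp only
        rw [if_neg (by tauto)]

theorem zfill_toDigits (b x : Nat) (w : Int) (hb : 2 ≤ b) (hb16 : b ≤ 16)
    (hw : 0 < w.toNat) (h : x < b ^ w.toNat) :
    PySem.Chars.zfill (Nat.toDigits b x) w = digitsBE b w.toNat x := by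
  rw [toDigits_eq b x hb]
  have hs : Nat.log b x + 1 ≤ w.toNat := by
    rcases Nat.eq_zero_or_pos x with hx | hx
    · subst hx; simp [Nat.log_zero_right]; omega
    · have := Nat.log_lt_of_lt_pow (by omega : x ≠ 0) h
      omega
  rw [zfill_no_sign _ _ (mem_digitsBE_ne_sign b _ x (by omega) hb16)]
  conv_rhs => rw [show w.toNat = (w.toNat - (Nat.log b x + 1)) + (Nat.log b x + 1) by omega, digitsBE_split]
  rw [Nat.div_eq_of_lt (by
        calc x < b ^ (Nat.log b x + 1) := Nat.lt_pow_succ_log_self (by omega) x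
        _ ≤ _ := Nat.pow_le_pow_right (by omega) le_rfl), digitsBE_zero]
  rw [length_digitsBE]

theorem parse_toDigits (b x : Nat) (hb : 2 ≤ b) (hb16 : b ≤ 16) :
    pvParse b (Nat.toDigits b x) = x := by
  rw [toDigits_eq b x hb, parse_digitsBE b _ x (by omega) hb16,
    Nat.mod_eq_of_lt (Nat.lt_pow_succ_log_self (by omega) x)]

theorem pvBin_eq (x : Nat) : pvBin x = Nat.toDigits 2 x := by
  rw [pvBin, PySem.Int.toBinChars0b, if_neg (by omega)]
  simp [pysem]

theorem testBit_mul_add (a b j k : Nat) (hb : b < 2 ^ k) :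
    (a * 2 ^ k + b).testBit j = if j < k then b.testBit j else a.testBit (j - k) := by
  rw [Nat.mul_comm]; exact Nat.testBit_two_pow_mul_add a hb j

theorem xor_high (h' i r k : Nat) (hr : r < 2 ^ k) :
    (h' * 2 ^ k + r) ^^^ (i * 2 ^ k) = (h' ^^^ i) * 2 ^ k + r := by
  apply Nat.eq_of_testBit_eq
  intro j
  have hz : (0 : Nat) < 2 ^ k := Nat.pow_pos (by omega)
  rw [Nat.testBit_xor, testBit_mul_add _ _ _ _ hr,
    show i * 2 ^ k = i * 2 ^ k + 0 by omega, testBit_mul_add _ _ _ _ hz,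
    testBit_mul_add _ _ _ _ hr]
  by_cases hj : j < k
  · simp [hj]
  · simp [hj, Nat.testBit_xor]

theorem xor_low (a v i k : Nat) (hv : v < 2 ^ k) (hi : i < 2 ^ k) :
    (a * 2 ^ k + v) ^^^ i = a * 2 ^ k + (v ^^^ i) := by
  apply Nat.eq_of_testBit_eq
  intro j
  rw [Nat.testBit_xor, testBit_mul_add _ _ _ _ hv,
    testBit_mul_add _ _ _ _ (Nat.xor_lt_two_pow hv hi)]
  by_cases hj : j < k
  · simp [hj, Nat.testBit_xor]
  · have : i.testBit j = false :=
      Nat.testBit_eq_false_of_lt (lt_of_lt_of_le hi (Nat.pow_le_pow_right (by omega) (by omega)))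
    simp [hj, this]

theorem and_mask (x n : Nat) : x &&& (2 ^ n - 1) = x % 2 ^ n :=
  Nat.and_two_pow_sub_one_eq_mod x n

theorem and_mask24 (x : Nat) : x &&& 16777215 = x % 2 ^ 24 := by
  rw [show (16777215 : Nat) = 2 ^ 24 - 1 by norm_num, and_mask]

theorem subChar_digitChar : ∀ d, d < 16 → subChar (Nat.digitChar d) = Nat.digitChar (SBOX.getD d 0) := by
  decide

theorem SBOX_getD_lt : ∀ d, d < 16 → SBOX.getD d 0 < 16 := by decide

theorem subChar_digitChar_mod (x : Nat) :
    subChar (Nat.digitChar (x % 16)) = Nat.digitChar (SBOX.getD (x % 16) 0) :=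
  subChar_digitChar _ (Nat.mod_lt _ (by omega))

theorem pvCharVal_SBOX_mod (x : Nat) :
    pvCharVal (Nat.digitChar (SBOX.getD (x % 16) 0)) = SBOX.getD (x % 16) 0 :=
  pvCharVal_digitChar _ (SBOX_getD_lt _ (Nat.mod_lt _ (by omega)))

theorem pvCharVal_digitChar_mod2 (x : Nat) : pvCharVal (Nat.digitChar (x % 2)) = x % 2 :=
  pvCharVal_digitChar _ (by omega)

theorem SBOX_getElem_le : ∀ d : Nat, d < 16 → SBOX[d]?.getD 0 ≤ 15 := by decide

-- shorthand: the six-nibble S-box pass as an integer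
def sboxSum (v : Nat) : Nat :=
  ((List.range 6).map (fun p => (SBOX.getD ((v >>> (4 * p)) &&& 0xF) 0) <<< (4 * p))).sum

-- parse of K[40:64] (= ki both in the loop and after it)
theorem L_ki (Kv : Nat) :
    pvParse 2 (PySem.List.slice (digitsBE 2 80 Kv) (some 40) (some 64)) = Kv / 2 ^ 16 % 2 ^ 24 := by
  rw [PySem.List.slice_toNat _ (by omega) (by omega)]
  simp only [show ((64:Int)).toNat = 64 from rfl, show ((40:Int)).toNat = 40 from rfl]
  rw [digitsBE_drop _ _ _ _ (by omega), digitsBE_take _ _ _ _ (by omega),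
    parse_digitsBE _ _ _ (by omega) (by omega)]

-- the rotated register as a digit string
theorem L_rot (Kv : Nat) (hK : Kv < 2 ^ 80) :
    PySem.List.slice (digitsBE 2 80 Kv) (some 61) none ++ PySem.List.slice (digitsBE 2 80 Kv) none (some 61)
      = digitsBE 2 80 (Kv % 2 ^ 19 * 2 ^ 61 + Kv / 2 ^ 19) := by
  rw [PySem.List.slice_from _ (by omega), PySem.List.slice_to _ (by omega)]
  simp only [show ((61:Int)).toNat = 61 from rfl]
  rw [digitsBE_drop _ _ _ _ (by omega), digitsBE_take _ _ _ _ (by omega),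
    digitsBE_append_eq _ _ _ _ _ (by omega) (by omega : Kv / 2 ^ (80 - 61) < 2 ^ 61)]
  norm_num
  rw [show Kv * 2305843009213693952 + Kv / 524288
      = Kv / 524288 * 2 ^ 80 + (Kv % 524288 * 2305843009213693952 + Kv / 524288) by omega,
    digitsBE_add_mul _ _ _ _ (by omega)]

-- parse of the substituted 6-hex-digit state = the nibble S-box pass
theorem L_sub (v : Nat) (hv : v < 2 ^ 24) :
    pvParse 16 ((PySem.Chars.zfill (pvHex v) 6).map subChar) = sboxSum v := by
  rw [pvHex, zfill_toDigits 16 v 6 (by omega) (by omega) (by norm_num)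
    (by rw [show ((6:Int)).toNat = 6 from rfl]; omega)]
  simp only [show ((6:Int)).toNat = 6 from rfl]
  simp only [digitsBE, List.map_append, List.map_cons, List.map_nil, List.nil_append,
    Nat.div_div_eq_div_mul, subChar_digitChar_mod]
  simp only [pvParse, List.foldl_append, List.foldl_cons, List.foldl_nil, pvCharVal_SBOX_mod]
  simp only [sboxSum, List.range_succ, List.range_zero, List.map_append, List.map_cons, List.map_nil,
    List.nil_append, List.sum_append, List.sum_cons, List.sum_nil,
    Nat.shiftRight_eq_div_pow, Nat.shiftLeft_eq]
  rw [show (0xF : Nat) = 2 ^ 4 - 1 by norm_num]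
  simp only [Nat.and_two_pow_sub_one_eq_mod]
  norm_num
  omega

theorem L_sub_lt (v : Nat) : sboxSum v < 2 ^ 24 := by
  simp only [sboxSum, List.range_succ, List.range_zero, List.map_append, List.map_cons, List.map_nil,
    List.nil_append, List.sum_append, List.sum_cons, List.sum_nil,
    Nat.shiftRight_eq_div_pow, Nat.shiftLeft_eq]
  rw [show (0xF : Nat) = 2 ^ 4 - 1 by norm_num]
  simp only [Nat.and_two_pow_sub_one_eq_mod]
  norm_num
  have b0 := SBOX_getElem_le (v % 16) (by omega)
  have b1 := SBOX_getElem_le (v / 16 % 16) (by omega)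
  have b2 := SBOX_getElem_le (v / 256 % 16) (by omega)
  have b3 := SBOX_getElem_le (v / 4096 % 16) (by omega)
  have b4 := SBOX_getElem_le (v / 65536 % 16) (by omega)
  have b5 := SBOX_getElem_le (v / 1048576 % 16) (by omega)
  omega

-- parse of the permuted 24-bit state string = B's _perm of the same value
theorem L_perm (w : Nat) (hw : w < 2 ^ 24) :
    pvParse 2 (liste_permutation.map
        (fun p => PySem.List.pyGetD (PySem.Chars.zfill (pvBin w) 24) p '0'))
      = permInt w := by
  rw [pvBin_eq, zfill_toDigits 2 w 24 (by omega) (by omega) (by norm_num)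
    (by rw [show ((24:Int)).toNat = 24 from rfl]; omega)]
  simp only [show ((24:Int)).toNat = 24 from rfl]
  simp only [digitsBE, Nat.div_div_eq_div_mul, List.nil_append]
  norm_num
  simp only [liste_permutation, List.map_cons, List.map_nil, PySem.List.pyGetD_ofNat']
  simp only [List.getD_cons_succ, List.getD_cons_zero]
  simp only [pvParse, List.foldl_cons, List.foldl_nil, pvCharVal_digitChar_mod2]
  simp only [permInt, List.range_succ, List.range_zero, List.map_append, List.map_cons, List.map_nil,
    List.nil_append, List.sum_append, List.sum_cons, List.sum_nil,
    Nat.shiftRight_eq_div_pow, Nat.shiftLeft_eq, Nat.and_one_is_mod]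
  norm_num [PBIT]
  omega

theorem L_perm_lt (w : Nat) : permInt w < 2 ^ 24 := by
  have h : permInt w ≤ ((List.range 24).map (fun b => 1 <<< b)).sum := by
    unfold permInt
    refine List.sum_le_sum ?_
    intro b _
    simp only [Nat.shiftLeft_eq]
    exact Nat.mul_le_mul_right _ Nat.and_le_right
  have h2 : ((List.range 24).map (fun b => 1 <<< b)).sum = 16777215 := by decide
  omega

theorem L_top (X : Nat) (h : X < 2 ^ 80) :
    pvParse 2 (PySem.List.slice (digitsBE 2 80 X) (some 0) (some 4)) = X / 2 ^ 76 := by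
  rw [PySem.List.slice_toNat _ (by omega) (by omega)]
  simp only [show ((4:Int)).toNat = 4 from rfl, show ((0:Int)).toNat = 0 from rfl, List.drop_zero]
  rw [digitsBE_take _ _ _ _ (by omega), parse_digitsBE _ _ _ (by omega) (by omega)]
  have : X / 2 ^ (80 - 4) < 2 ^ 4 := by omega
  rw [Nat.mod_eq_of_lt this]

theorem L_mid (X : Nat) :
    pvParse 2 (PySem.List.slice (digitsBE 2 80 X) (some 60) (some 65)) = X / 2 ^ 15 % 2 ^ 5 := by
  rw [PySem.List.slice_toNat _ (by omega) (by omega)]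
  simp only [show ((65:Int)).toNat = 65 from rfl, show ((60:Int)).toNat = 60 from rfl]
  rw [digitsBE_drop _ _ _ _ (by omega), digitsBE_take _ _ _ _ (by omega),
    parse_digitsBE _ _ _ (by omega) (by omega)]

theorem L_take4 (S : Nat) :
    PySem.List.slice (digitsBE 2 4 S) (some 0) (some 4) = digitsBE 2 4 S := by
  rw [PySem.List.slice_toNat _ (by omega) (by omega)]
  simp only [show ((4:Int)).toNat = 4 from rfl, show ((0:Int)).toNat = 0 from rfl, List.drop_zero]
  rw [digitsBE_take _ _ _ _ (by omega)]
  norm_num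

theorem L_drop4 (X : Nat) :
    PySem.List.slice (digitsBE 2 80 X) (some 4) none = digitsBE 2 76 X := by
  rw [PySem.List.slice_from _ (by omega)]
  simp only [show ((4:Int)).toNat = 4 from rfl]
  rw [digitsBE_drop _ _ _ _ (by omega)]

theorem L_take60 (X : Nat) :
    PySem.List.slice (digitsBE 2 80 X) none (some 60) = digitsBE 2 60 (X / 2 ^ 20) := by
  rw [PySem.List.slice_to _ (by omega)]
  simp only [show ((60:Int)).toNat = 60 from rfl]
  rw [digitsBE_take _ _ _ _ (by omega)]

theorem L_drop65 (X : Nat) :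
    PySem.List.slice (digitsBE 2 80 X) (some 65) none = digitsBE 2 15 (X % 2 ^ 15) := by
  rw [PySem.List.slice_from _ (by omega)]
  simp only [show ((65:Int)).toNat = 65 from rfl]
  rw [digitsBE_drop _ _ _ _ (by omega)]
  conv_lhs => rw [show X = X / 2 ^ 15 * 2 ^ 15 + X % 2 ^ 15 by omega]
  rw [digitsBE_add_mul _ _ _ _ (by omega)]

theorem pvHex_lt16 (d : Nat) (h : d < 16) : pvHex d = [Nat.digitChar d] := by
  rw [pvHex, toDigits_eq 16 d (by omega), Nat.log_of_lt h]
  simp [digitsBE, Nat.mod_eq_of_lt h]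

theorem pvParse_single (d : Nat) (h : d < 16) : pvParse 16 [Nat.digitChar d] = d := by
  show 0 * 16 + pvCharVal (Nat.digitChar d) = d
  rw [pvCharVal_digitChar _ h]
  omega

theorem zfill_pvBin (x n : Nat) (w : Int) (hw : w.toNat = n) (hn : 0 < n) (h : x < 2 ^ n) :
    PySem.Chars.zfill (pvBin x) w = digitsBE 2 n x := by
  rw [pvBin_eq, zfill_toDigits 2 x w (by omega) (by omega) (by omega) (by rw [hw]; exact h), hw]

theorem digitsBE_mod76 (X : Nat) : digitsBE 2 76 X = digitsBE 2 76 (X % 2 ^ 76) := by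
  conv_lhs => rw [show X = X / 2 ^ 76 * 2 ^ 76 + X % 2 ^ 76 by omega]
  rw [digitsBE_add_mul _ _ _ _ (by omega)]

-- lookup in a (range 16).map table
theorem getD_map16 (g : Nat → Nat) (d : Nat) (h : d < 16) :
    ((List.range 16).map g).getD d 0 = g d := by
  rw [List.getD_eq_getElem?_getD, List.getElem?_map, List.getElem?_range h]
  rfl

-- B's six T-table lookups summed = perm applied to the S-box pass (A's round core)
theorem bitAt_toNat (w P : Nat) : w >>> P &&& 1 = if w.testBit P then 1 else 0 := by
  rw [Nat.and_one_is_mod, Nat.shiftRight_eq_div_pow, Nat.testBit_eq_decide_div_mod_eq]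
  have : w / 2 ^ P % 2 < 2 := Nat.mod_lt _ (by omega)
  split_ifs with h
  · simpa using h
  · simp at h; omega

theorem bit_split (c r k P : Nat) (hr : r < 2 ^ k) :
    (c * 2 ^ k + r) >>> P &&& 1 = ((c * 2 ^ k) >>> P &&& 1) + (r >>> P &&& 1) := by
  have h2 : (c * 2 ^ k).testBit P = if P < k then false else c.testBit (P - k) := by
    rw [show c * 2 ^ k = c * 2 ^ k + 0 by ring, testBit_mul_add _ _ _ _ (Nat.pow_pos (by omega))]
    simp [Nat.zero_testBit]
  simp only [bitAt_toNat]
  rw [testBit_mul_add _ _ _ _ hr, h2]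
  by_cases hP : P < k
  · simp [hP]
  · rw [if_neg hP, if_neg hP,
      Nat.testBit_eq_false_of_lt (lt_of_lt_of_le hr (Nat.pow_le_pow_right (by omega) (by omega)))]
    simp

-- perm distributes over a split into a low part below 2^k and a multiple of 2^k
theorem permInt_split (c r k : Nat) (hr : r < 2 ^ k) :
    permInt (c * 2 ^ k + r) = permInt (c * 2 ^ k) + permInt r := by
  unfold permInt
  have hpt : (List.range 24).map (fun b => ((c * 2 ^ k + r) >>> PBIT.getD b 0 &&& 1) <<< b)
      = (List.range 24).map (fun b => (((c * 2 ^ k) >>> PBIT.getD b 0 &&& 1) <<< b)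
          + ((r >>> PBIT.getD b 0 &&& 1) <<< b)) := by
    apply List.map_congr_left
    intro b _
    rw [bit_split c r k _ hr, Nat.shiftLeft_eq, Nat.shiftLeft_eq, Nat.shiftLeft_eq, Nat.add_mul]
  rw [hpt, List.sum_map_add]

-- perm of six disjoint nibbles, split term by term
theorem permInt_six (s0 s1 s2 s3 s4 s5 : Nat) (h0 : s0 < 16) (h1 : s1 < 16) (h2 : s2 < 16)
    (h3 : s3 < 16) (h4 : s4 < 16) (_h5 : s5 < 16) :
    permInt (s0 + s1 * 2 ^ 4 + s2 * 2 ^ 8 + s3 * 2 ^ 12 + s4 * 2 ^ 16 + s5 * 2 ^ 20)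
      = permInt s0 + permInt (s1 * 2 ^ 4) + permInt (s2 * 2 ^ 8) + permInt (s3 * 2 ^ 12)
        + permInt (s4 * 2 ^ 16) + permInt (s5 * 2 ^ 20) := by
  rw [show s0 + s1 * 2 ^ 4 + s2 * 2 ^ 8 + s3 * 2 ^ 12 + s4 * 2 ^ 16 + s5 * 2 ^ 20
      = s5 * 2 ^ 20 + (s4 * 2 ^ 16 + (s3 * 2 ^ 12 + (s2 * 2 ^ 8 + (s1 * 2 ^ 4 + s0)))) by ring]
  rw [permInt_split s5 _ 20 (by omega), permInt_split s4 _ 16 (by omega),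
    permInt_split s3 _ 12 (by omega), permInt_split s2 _ 8 (by omega),
    permInt_split s1 _ 4 (by omega)]
  omega

-- B's six T-table lookups summed = perm applied to the S-box pass (A's round core)
theorem Ttab_round (v : Nat) :
    (List.range 6).foldl (fun s p => s + (Ttab.getD p []).getD ((v >>> (4 * p)) &&& 0xF) 0) 0
      = permInt (sboxSum v) := by
  have hnib : ∀ k : Nat, v >>> k &&& 0xF < 16 := by
    intro k
    rw [show (0xF : Nat) = 2 ^ 4 - 1 by norm_num, and_mask]
    exact Nat.mod_lt _ (by omega)
  have hT : ∀ p, p < 6 → Ttab.getD p []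
      = (List.range 16).map (fun d => permInt (SBOX.getD d 0 <<< (4 * p))) := by
    intro p hp
    unfold Ttab
    rw [List.getD_eq_getElem?_getD, List.getElem?_map, List.getElem?_range hp]
    rfl
  simp only [List.range_succ, List.range_zero, List.foldl_append, List.foldl_cons, List.foldl_nil]
  rw [hT 0 (by omega), hT 1 (by omega), hT 2 (by omega), hT 3 (by omega), hT 4 (by omega),
    hT 5 (by omega)]
  rw [getD_map16 _ _ (hnib 0), getD_map16 _ _ (hnib _), getD_map16 _ _ (hnib _),
    getD_map16 _ _ (hnib _), getD_map16 _ _ (hnib _), getD_map16 _ _ (hnib _)]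
  simp only [sboxSum, List.range_succ, List.range_zero, List.map_append, List.map_cons,
    List.map_nil, List.nil_append, List.sum_append, List.sum_cons, List.sum_nil,
    Nat.shiftLeft_eq, Nat.add_zero]
  rw [show ((4:Nat) * 0) = 0 from rfl, show ((4:Nat) * 1) = 4 from rfl,
    show ((4:Nat) * 2) = 8 from rfl, show ((4:Nat) * 3) = 12 from rfl,
    show ((4:Nat) * 4) = 16 from rfl, show ((4:Nat) * 5) = 20 from rfl]
  simp only [pow_zero, Nat.mul_one]
  rw [permInt_six _ _ _ _ _ _ (SBOX_getD_lt _ (hnib 0)) (SBOX_getD_lt _ (hnib 4))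
    (SBOX_getD_lt _ (hnib 8)) (SBOX_getD_lt _ (hnib 12)) (SBOX_getD_lt _ (hnib 16))
    (SBOX_getD_lt _ (hnib 20))]
  omega

-- the etat string A's round produces, as a function of the incoming state/key values
def esAfter (s Kv : Nat) : List Char :=
  liste_permutation.map (fun p => PySem.List.pyGetD
    (PySem.Chars.zfill (pvBin (pvParse 16
      ((PySem.Chars.zfill (pvHex (s ^^^ Kv / 2 ^ 16 % 2 ^ 24)) 6).map subChar))) 24) p '0')

-- one A-round on string registers = the key-schedule step + the T-table round on values
theorem round_sim (i : Int) (hi1 : 1 ≤ i) (hi2 : i ≤ 10) (j Kv s : Nat) (es : List Char)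
    (hK : Kv < 2 ^ 80) (hs : s < 2 ^ 24) (hes : pvParse 2 es = s) :
    chiffRound (j, digitsBE 2 80 Kv, es) i
        = (j + 1, digitsBE 2 80 (nextKey Kv i), esAfter s Kv)
      ∧ pvParse 2 (esAfter s Kv) = encRound s ((Kv >>> 16) &&& 0xFFFFFF)
      ∧ encRound s ((Kv >>> 16) &&& 0xFFFFFF) < 2 ^ 24 ∧ nextKey Kv i < 2 ^ 80 := by
  have hiN2 : i.toNat ≤ 10 := by omega
  obtain ⟨K1, hK1def⟩ : ∃ t, t = Kv % 2 ^ 19 * 2 ^ 61 + Kv / 2 ^ 19 := ⟨_, rfl⟩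
  have hK1 : K1 < 2 ^ 80 := by rw [hK1def]; omega
  have hd16 : K1 / 2 ^ 76 < 16 := by clear hK1def; omega
  obtain ⟨S, hSdef⟩ : ∃ t, t = SBOX.getD (K1 / 2 ^ 76) 0 := ⟨_, rfl⟩
  have hS : S < 16 := by rw [hSdef]; exact SBOX_getD_lt _ hd16
  obtain ⟨K2, hK2def⟩ : ∃ t, t = S * 2 ^ 76 + K1 % 2 ^ 76 := ⟨_, rfl⟩
  have hK2 : K2 < 2 ^ 80 := by rw [hK2def]; clear hK1def hSdef; omega
  obtain ⟨v5, hv5def⟩ : ∃ t, t = K2 / 2 ^ 15 % 2 ^ 5 := ⟨_, rfl⟩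
  have hv5 : v5 < 2 ^ 5 := by rw [hv5def]; clear hK1def hSdef hK2def; omega
  have hxor5 : v5 ^^^ i.toNat < 2 ^ 5 := Nat.xor_lt_two_pow hv5 (by clear hK1def hSdef hK2def hv5def; omega)
  obtain ⟨K3, hK3def⟩ : ∃ t, t = K2 / 2 ^ 20 * 2 ^ 20 + (v5 ^^^ i.toNat) * 2 ^ 15 + K2 % 2 ^ 15 :=
    ⟨_, rfl⟩
  have hK3 : K3 < 2 ^ 80 := by
    rw [hK3def]; clear hK1def hSdef hK2def hv5def hK3def; omega
  have hm76 : K1 % 2 ^ 76 < 2 ^ 76 := by clear hK1def hSdef hK2def hv5def hK3def; omega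
  have hm15 : K2 % 2 ^ 15 < 2 ^ 15 := by clear hK1def hSdef hK2def hv5def hK3def; omega
  -- B's key step in arithmetic form
  have hB2 : nextKey Kv i = K3 := by
    simp only [nextKey]
    rw [show (1:Nat) <<< 19 - 1 = 2 ^ 19 - 1 by norm_num [Nat.shiftLeft_eq],
      and_mask, show (1:Nat) <<< 76 = 2 ^ 76 by norm_num [Nat.shiftLeft_eq]]
    simp only [Nat.shiftLeft_eq, Nat.shiftRight_eq_div_pow]
    rw [← hK1def, ← hSdef, ← hK2def]
    have hK2eq : K2 = (K2 / 2 ^ 20 * 2 ^ 5 + v5) * 2 ^ 15 + K2 % 2 ^ 15 := by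
      rw [hv5def]; clear hK1def hSdef hK2def hv5def hK3def; omega
    conv_lhs => rw [hK2eq]
    rw [xor_high _ _ _ _ hm15, xor_low _ _ _ _ hv5 (by clear hK1def hSdef hK2def hv5def hK3def; omega : i.toNat < 2 ^ 5)]
    rw [hK3def]
    clear hK1def hSdef hK2def hv5def hK3def hK2eq
    omega
  have hv : s ^^^ Kv / 2 ^ 16 % 2 ^ 24 < 2 ^ 24 :=
    Nat.xor_lt_two_pow hs (by clear hK1def hSdef hK2def hv5def hK3def; omega)
  have hw := L_sub (s ^^^ Kv / 2 ^ 16 % 2 ^ 24) hv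
  have hEnc : encRound s ((Kv >>> 16) &&& 0xFFFFFF) = permInt (sboxSum (s ^^^ Kv / 2 ^ 16 % 2 ^ 24)) := by
    simp only [encRound]
    rw [show (0xFFFFFF : Nat) = 16777215 from rfl, and_mask24, Nat.shiftRight_eq_div_pow]
    exact Ttab_round _
  refine ⟨?_, ?_, ?_, ?_⟩
  · -- the string-level round equals the value-level round
    simp only [chiffRound]
    rw [hes, L_ki Kv, L_rot Kv hK, ← hK1def, L_top K1 hK1, pvHex_lt16 _ hd16]
    rw [show [Nat.digitChar (K1 / 2 ^ 76)].map subChar = [subChar (Nat.digitChar (K1 / 2 ^ 76))] from rfl]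
    rw [subChar_digitChar _ hd16, pvParse_single _ (SBOX_getD_lt _ hd16), ← hSdef]
    rw [zfill_pvBin S 4 4 rfl (by omega) (hS : S < 2 ^ 4)]
    rw [L_take4, L_drop4, digitsBE_mod76 K1,
      digitsBE_append_eq 2 4 76 S (K1 % 2 ^ 76) (by omega) hm76,
      show (4 + 76 : Nat) = 80 from rfl, ← hK2def]
    rw [L_mid K2, ← hv5def, zfill_pvBin (v5 ^^^ i.toNat) 5 5 rfl (by omega) hxor5]
    rw [L_take60, L_drop65,
      digitsBE_append_eq 2 60 5 (K2 / 2 ^ 20) (v5 ^^^ i.toNat) (by omega) hxor5,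
      show (60 + 5 : Nat) = 65 from rfl,
      digitsBE_append_eq 2 65 15 _ (K2 % 2 ^ 15) (by omega) hm15,
      show (65 + 15 : Nat) = 80 from rfl]
    rw [hB2]
    rw [Prod.mk.injEq, Prod.mk.injEq]
    refine ⟨rfl, ?_, by rw [esAfter]⟩
    congr 1
    rw [hK3def]
    clear hK1def hSdef hK2def hv5def hK3def
    omega
  · rw [hEnc]
    unfold esAfter
    rw [hw]
    exact L_perm _ (L_sub_lt _)
  · rw [hEnc]; exact L_perm_lt _
  · rw [hB2]; exact hK3

-- stage 1's fold is accumulator-prefix independent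
theorem keyStep_acc (l : List Int) : ∀ (a : List Nat) (K : Nat),
    l.foldl keyStep (a, K) = (a ++ (l.foldl keyStep ([], K)).1, (l.foldl keyStep ([], K)).2) := by
  induction l with
  | nil => intro a K; simp
  | cons i l ih =>
      intro a K
      simp only [List.foldl_cons, keyStep]
      rw [ih (a ++ _), ih ([] ++ _)]
      simp

-- the joint simulation: A's string fold tracks B's key schedule and round values
theorem fold_sim (l : List Int) (hmem : ∀ i ∈ l, 1 ≤ i ∧ i ≤ 10) :
    ∀ (j Kv s : Nat) (es : List Char), Kv < 2 ^ 80 → s < 2 ^ 24 → pvParse 2 es = s →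
    ∃ es', l.foldl chiffRound (j, digitsBE 2 80 Kv, es)
        = (j + l.length, digitsBE 2 80 (l.foldl keyStep ([], Kv)).2, es')
      ∧ pvParse 2 es' = ((l.foldl keyStep ([], Kv)).1).foldl encRound s
      ∧ ((l.foldl keyStep ([], Kv)).1).foldl encRound s < 2 ^ 24
      ∧ (l.foldl keyStep ([], Kv)).2 < 2 ^ 80
      ∧ (l.foldl keyStep ([], Kv)).1.length = l.length := by
  induction l with
  | nil =>
      intro j Kv s es hK hs hes
      exact ⟨es, by simp, by simp [hes], by simpa, by simpa, by simp⟩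
  | cons i l ih =>
      intro j Kv s es hK hs hes
      have hi := hmem i (by simp)
      obtain ⟨h1, h2, h3, h4⟩ := round_sim i hi.1 hi.2 j Kv s es hK hs hes
      rw [List.foldl_cons, List.foldl_cons, h1]
      rw [show keyStep ([], Kv) i = ([(Kv >>> 16) &&& 0xFFFFFF], nextKey Kv i) from rfl]
      rw [keyStep_acc l [(Kv >>> 16) &&& 0xFFFFFF] (nextKey Kv i)]
      obtain ⟨es', he, hp, hb1, hb2, hlen⟩ :=
        ih (fun x hx => hmem x (by simp [hx])) (j + 1) (nextKey Kv i)
          (encRound s ((Kv >>> 16) &&& 0xFFFFFF)) (esAfter s Kv) h4 h3 h2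
      refine ⟨es', ?_, ?_, ?_, ?_, ?_⟩
      · rw [he]; simp; omega
      · simpa using hp
      · simpa using hb1
      · exact hb2
      · simp [hlen]

theorem init_etat (x : Nat) : pvParse 2 (pvBin x) = x := by
  rw [pvBin_eq]; exact parse_toDigits 2 x (by omega) (by omega)

-- ===== VERDICT (by name: the statement is the Claim_ definition above) =====
theorem main_chiffrement_spec : Claim_equal_main_chiffrement := by
  unfold Claim_equal_main_chiffrement
  intro m CLE hdom hpre
  unfold Spec_main_chiffrement
  unfold Pre_main_chiffrement at hpre
  rw [Bool.and_eq_true] at hpre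
  obtain ⟨hm, hk⟩ := hpre
  cases hmv : PySem.Int.ofCharsBase? m.toList 16 with
  | none => rw [hmv] at hm; simp [Option.any] at hm
  | some mv =>
  cases hkv : PySem.Int.ofCharsBase? (CLE.toList ++ List.replicate 14 '0') 16 with
  | none => rw [hkv] at hk; simp [Option.any] at hk
  | some kv =>
  rw [hmv] at hm
  rw [hkv] at hk
  simp only [Option.any, decide_eq_true_eq] at hm hk
  simp only [main_chiffrement, main_chiffrement_alt, hmv, hkv, Option.getD_some]
  have hmvn : mv.toNat < 2 ^ 24 := by omega
  have hkvn : kv.toNat < 2 ^ 80 := by omega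
  rw [zfill_pvBin kv.toNat 80 80 rfl (by omega) hkvn]
  obtain ⟨es', he, hp, hlt, hKlt, hlen⟩ := fold_sim (PySem.List.pyRange 1 11 1) (by decide)
    0 kv.toNat mv.toNat (pvBin mv.toNat) hkvn hmvn (init_etat _)
  rw [he, hp, L_ki]
  -- round_keys[:10] is exactly the 10 keys of stage 1, round_keys[10] the final key
  have hlen10 : ((PySem.List.pyRange 1 11 1).foldl keyStep ([], kv.toNat)).1.length = 10 := by
    rw [hlen]; decide
  rw [PySem.List.slice_to _ (by omega)]
  rw [show ((10:Int)).toNat = 10 from rfl, ← hlen10, List.take_left]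
  rw [List.getD_eq_getElem?_getD, List.getElem?_append_right (by omega), hlen10]
  simp only [Nat.sub_self, List.getElem?_cons_zero, Option.getD_some]
  rw [Nat.shiftRight_eq_div_pow, and_mask24]
  rfl
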